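-- pv_equiv track=rewrite | github.com/quantmew/ripperdoc | ripperdoc/cli/worktree_tmux.py | _strip_tmux_worktree_args
-- ===== SOURCE A (Python) =====
-- def _strip_tmux_worktree_args(argv: list[str]) -> list[str]:
--     processed: list[str] = []
--     index = 0
--     while index < len(argv):
--         token = argv[index]
--         if token in {"--tmux", "--tmux=classic"}:
--             index += 1
--             continue
--         if token in {"-w", "--worktree", "--worktree-name"}:
--             next_token = argv[index + 1] if index + 1 < len(argv) else None
--             if next_token and not next_token.startswith("-"):
--                 index += 2
--             else:
--                 index += 1
--             continue
--         if token.startswith("--worktree=") or token.startswith("--worktree-name="):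
--             index += 1
--             continue
--         processed.append(token)
--         index += 1
--     return processed
-- ===== SOURCE B (Python) =====
-- def _strip_tmux_worktree_args(argv: list[str]) -> list[str]:
--     processed: list[str] = []
--     expect_value = False
--     for token in argv:
--         if expect_value:
--             expect_value = False
--             if token and not token.startswith("-"):
--                 continue
--         if token in ("--tmux", "--tmux=classic"):
--             continue
--         if token in ("-w", "--worktree", "--worktree-name"):
--             expect_value = True
--             continue
--         if token.startswith("--worktree=") or token.startswith("--worktree-name="):
--             continue
--         processed.append(token)
--     return processed
-- ===== Notes on version B (the rewrite author's own statement) =====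
-- stated objective: simpler
-- what changed: Replaces the index-based while loop with argv[index+1] lookahead by a single forward for-loop over the tokens carrying an expect_value flag, so there is no index arithmetic or lookahead at all.
import Mathlib
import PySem

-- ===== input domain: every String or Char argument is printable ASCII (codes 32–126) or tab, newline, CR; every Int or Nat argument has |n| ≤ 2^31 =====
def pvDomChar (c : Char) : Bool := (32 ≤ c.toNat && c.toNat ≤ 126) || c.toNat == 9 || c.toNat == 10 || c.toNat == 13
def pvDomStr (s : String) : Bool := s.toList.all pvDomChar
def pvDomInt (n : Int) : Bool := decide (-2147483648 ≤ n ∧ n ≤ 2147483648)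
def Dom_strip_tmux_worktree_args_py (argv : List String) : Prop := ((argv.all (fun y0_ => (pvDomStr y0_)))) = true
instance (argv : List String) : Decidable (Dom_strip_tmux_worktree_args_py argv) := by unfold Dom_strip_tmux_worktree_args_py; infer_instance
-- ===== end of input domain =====

-- B replaces A's index-based while loop with argv[index+1] lookahead by a single
-- forward pass carrying an expect_value flag (objective: simpler; same O(n) cost).

-- ===== PORT A =====
-- literal port of A's while loop: index arithmetic, lookahead at index+1
def strip_tmux_worktree_args_py_loop (argv : List String) (index : Nat) (processed : List String) : List String :=
  if h : index < argv.length then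
    if argv[index] == "--tmux" || argv[index] == "--tmux=classic" then
      strip_tmux_worktree_args_py_loop argv (index + 1) processed
    else if argv[index] == "-w" || argv[index] == "--worktree" || argv[index] == "--worktree-name" then
      -- next_token = argv[index + 1] if index + 1 < len(argv) else None
      match (if index + 1 < argv.length then some argv[index + 1]! else none) with
      | some s =>
        if s ≠ "" && !(PySem.Str.startswith s "-") then
          strip_tmux_worktree_args_py_loop argv (index + 2) processed
        else
          strip_tmux_worktree_args_py_loop argv (index + 1) processed
      | none => strip_tmux_worktree_args_py_loop argv (index + 1) processed
    else if PySem.Str.startswith argv[index] "--worktree=" || PySem.Str.startswith argv[index] "--worktree-name=" then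
      strip_tmux_worktree_args_py_loop argv (index + 1) processed
    else
      strip_tmux_worktree_args_py_loop argv (index + 1) (processed ++ [argv[index]])
  else processed
termination_by argv.length - index
decreasing_by all_goals omega

def strip_tmux_worktree_args_py (argv : List String) : List String :=
  strip_tmux_worktree_args_py_loop argv 0 []

-- ===== PORT B =====
-- the branches of B's loop body after the expect_value check (state = (expect_value, processed))
def strip_tmux_worktree_args_py_core (token : String) (processed : List String) : Bool × List String :=
  if token == "--tmux" || token == "--tmux=classic" then (false, processed)
  else if token == "-w" || token == "--worktree" || token == "--worktree-name" then (true, processed)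
  else if PySem.Str.startswith token "--worktree=" || PySem.Str.startswith token "--worktree-name=" then
    (false, processed)
  else (false, processed ++ [token])

-- one iteration of B's for-loop body
def strip_tmux_worktree_args_py_step (st : Bool × List String) (token : String) : Bool × List String :=
  if st.1 && (token ≠ "" && !(PySem.Str.startswith token "-")) then (false, st.2)
  else strip_tmux_worktree_args_py_core token st.2

def strip_tmux_worktree_args_py_alt (argv : List String) : List String :=
  (argv.foldl strip_tmux_worktree_args_py_step (false, [])).2

-- ===== PRECONDITION & SPEC =====
def Spec_strip_tmux_worktree_args_py (argv : List String) (out : List String) : Prop := out = strip_tmux_worktree_args_py_alt argv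
instance (argv : List String) (out : List String) : Decidable (Spec_strip_tmux_worktree_args_py argv out) := by unfold Spec_strip_tmux_worktree_args_py; infer_instance

-- ===== CLAIM (what is proved, stated in full; the proofs are below) =====
def Claim_equal_strip_tmux_worktree_args_py : Prop := ∀ (argv : List String), Dom_strip_tmux_worktree_args_py argv → Spec_strip_tmux_worktree_args_py argv (strip_tmux_worktree_args_py argv)

-- ===== LEMMAS AND PROOFS =====

-- B's step with expect_value = False is just the branch cascade
lemma step_false (acc : List String) (token : String) :
    strip_tmux_worktree_args_py_step (false, acc) token = strip_tmux_worktree_args_py_core token acc := by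
  simp [strip_tmux_worktree_args_py_step]

-- when the value-dropping condition fails, the flag does not matter
lemma step_flag_irrel (b : Bool) (acc : List String) (token : String)
    (h : ¬ (decide (token ≠ "") && !(PySem.Str.startswith token "-")) = true) :
    strip_tmux_worktree_args_py_step (b, acc) token = strip_tmux_worktree_args_py_core token acc := by
  have hcond : ¬ ((b, acc).1 && (decide (token ≠ "") && !(PySem.Str.startswith token "-"))) = true := by
    cases b <;> simp_all
  unfold strip_tmux_worktree_args_py_step
  rw [if_neg hcond]

-- invariant: A's loop from position `index` equals B's fold over the remaining tokens
-- started with a cleared flag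
lemma loop_eq_foldl (n : Nat) : ∀ (argv : List String) (index : Nat) (processed : List String),
    argv.length - index ≤ n →
    strip_tmux_worktree_args_py_loop argv index processed =
      (List.foldl strip_tmux_worktree_args_py_step (false, processed) (argv.drop index)).2 := by
  induction n with
  | zero =>
    intro argv index processed hle
    have h : ¬ index < argv.length := by omega
    rw [strip_tmux_worktree_args_py_loop]
    simp [dif_neg h, List.drop_eq_nil_iff.mpr (by omega : argv.length ≤ index)]
  | succ n ih =>
    intro argv index processed hle
    rw [strip_tmux_worktree_args_py_loop]
    by_cases h : index < argv.length
    · rw [dif_pos h, List.drop_eq_getElem_cons h, List.foldl_cons, step_false]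
      by_cases h1 : (argv[index] == "--tmux" || argv[index] == "--tmux=classic") = true
      · rw [if_pos h1, ih argv (index + 1) processed (by omega)]
        have : strip_tmux_worktree_args_py_core argv[index] processed = (false, processed) := by
          rcases Bool.or_eq_true_iff.mp h1 with h1 | h1 <;>
            simp [strip_tmux_worktree_args_py_core, eq_of_beq h1]
        rw [this]
      · rw [if_neg h1]
        by_cases h2 : (argv[index] == "-w" || argv[index] == "--worktree" || argv[index] == "--worktree-name") = true
        · rw [if_pos h2]
          have hcore : strip_tmux_worktree_args_py_core argv[index] processed = (true, processed) := by
            rcases Bool.or_eq_true_iff.mp h2 with h12 | h2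
            · rcases Bool.or_eq_true_iff.mp h12 with h2 | h2 <;>
                simp [strip_tmux_worktree_args_py_core, eq_of_beq h2]
            · simp [strip_tmux_worktree_args_py_core, eq_of_beq h2]
          rw [hcore]
          by_cases hlt : index + 1 < argv.length
          · rw [if_pos hlt]
            have hget : argv[index + 1]! = argv[index + 1] := getElem!_pos argv (index + 1) hlt
            have hdrop1 : argv.drop (index + 1) = argv[index + 1] :: argv.drop (index + 2) :=
              List.drop_eq_getElem_cons hlt
            rw [hget, hdrop1, List.foldl_cons]
            dsimp only
            by_cases hc : (decide (argv[index + 1] ≠ "") && !(PySem.Str.startswith argv[index + 1] "-")) = true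
            · rw [if_pos hc, ih argv (index + 2) processed (by omega)]
              have : strip_tmux_worktree_args_py_step (true, processed) argv[index + 1] = (false, processed) := by
                unfold strip_tmux_worktree_args_py_step
                rw [if_pos (by simpa using hc)]
              rw [this]
            · rw [if_neg hc, ih argv (index + 1) processed (by omega), hdrop1, List.foldl_cons,
                step_false, step_flag_irrel _ _ _ hc]
          · rw [if_neg hlt]
            dsimp only
            rw [ih argv (index + 1) processed (by omega)]
            have hnil : argv.drop (index + 1) = [] := List.drop_eq_nil_iff.mpr (by omega)
            rw [hnil]
            simp
        · rw [if_neg h2]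
          by_cases h3 : (PySem.Str.startswith argv[index] "--worktree=" || PySem.Str.startswith argv[index] "--worktree-name=") = true
          · have hcore : strip_tmux_worktree_args_py_core argv[index] processed = (false, processed) := by
              unfold strip_tmux_worktree_args_py_core
              rw [if_neg h1, if_neg h2, if_pos h3]
            rw [if_pos h3, ih argv (index + 1) processed (by omega), hcore]
          · have hcore : strip_tmux_worktree_args_py_core argv[index] processed = (false, processed ++ [argv[index]]) := by
              unfold strip_tmux_worktree_args_py_core
              rw [if_neg h1, if_neg h2, if_neg h3]
            rw [if_neg h3, ih argv (index + 1) (processed ++ [argv[index]]) (by omega), hcore]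
    · rw [dif_neg h, List.drop_eq_nil_iff.mpr (by omega : argv.length ≤ index)]
      simp

-- ===== VERDICT (by name: the statement is the Claim_ definition above) =====
theorem strip_tmux_worktree_args_py_spec : Claim_equal_strip_tmux_worktree_args_py := by
  intro argv _
  unfold Spec_strip_tmux_worktree_args_py strip_tmux_worktree_args_py strip_tmux_worktree_args_py_alt
  simpa using loop_eq_foldl argv.length argv 0 [] (by omega)
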